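-- pv_equiv track=rewrite | github.com/soaringk/ontic-wiki | src/client/mineru.py | _sample_pages
-- ===== SOURCE A (Python) =====
-- import math
--
-- def _sample_pages(pages) -> list:
--     total_pages = len(pages)
--     sample_count = max(1, math.ceil(total_pages / 2))
--     if sample_count >= total_pages:
--         return list(pages)
--
--     indices: list[int] = []
--     for i in range(sample_count):
--         index = min(total_pages - 1, math.floor(i * total_pages / sample_count))
--         if not indices or index != indices[-1]:
--             indices.append(index)
--     return [pages[index] for index in indices]
-- ===== SOURCE B (Python) =====
-- def _sample_pages(pages) -> list:
--     # Single pass over the pages themselves: keep page j exactly when the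
--     # half-open window [j*sc, j*sc+sc) contains a multiple of n, tracked by a
--     # running remainder r = (j*sc) % n; no index arithmetic, clamp or dedup.
--     n = len(pages)
--     sc = (n + 1) // 2
--     out = []
--     r = 0
--     for p in pages:
--         if r == 0 or r > n - sc:
--             out.append(p)
--         r = (r + sc) % n
--     return out
-- ===== Notes on version B (the rewrite author's own statement) =====
-- stated objective: alternative
-- what changed: Instead of generating sample indices (float floor(i*n/sc) with clamp and dedup) and then indexing into pages, B makes a single filtering pass over the pages themselves, keeping page j exactly when the stride window [j*sc, j*sc+sc) contains a multiple of n, tracked by a running remainder (r+sc) % n; no float math, indexing, clamp, dedup or early-return branch remain.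
import Mathlib
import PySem

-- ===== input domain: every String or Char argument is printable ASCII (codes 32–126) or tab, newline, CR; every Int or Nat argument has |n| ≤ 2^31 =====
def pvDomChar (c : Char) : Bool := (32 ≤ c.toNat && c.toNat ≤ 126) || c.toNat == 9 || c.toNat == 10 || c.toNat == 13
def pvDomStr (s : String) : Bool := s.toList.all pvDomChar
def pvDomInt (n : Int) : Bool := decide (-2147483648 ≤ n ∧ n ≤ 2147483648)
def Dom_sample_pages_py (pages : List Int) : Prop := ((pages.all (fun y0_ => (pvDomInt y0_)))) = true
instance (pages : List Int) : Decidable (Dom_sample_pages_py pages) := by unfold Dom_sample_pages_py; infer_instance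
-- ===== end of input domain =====

-- B replaces A's index-generation loop (floor(i*n/sc), clamp, dedup, then indexing)
-- by a single filtering pass over the pages with a running remainder; return value proved equal on all inputs.

-- ===== PORT A =====
-- math.ceil(total/2) and math.floor(i*total/sc) are ported as exact integer ceiling/floor division:
-- exact, since these small nonnegative quotients are computed exactly by Python's float arithmetic.
def sample_pages_py (pages : List Int) : List Int :=
  let total : Int := pages.length
  let sample_count : Int := max 1 (PySem.Int.floordiv (total + 1) 2)
  if sample_count ≥ total then pages
  else
    let indices : List Int := (PySem.List.pyRange 0 sample_count 1).foldl
      (fun acc i =>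
        let index := min (total - 1) (PySem.Int.floordiv (i * total) sample_count)
        -- `indices[-1]` is only read when the list is nonempty (short-circuit), so the default is never used
        if acc = [] ∨ index ≠ PySem.List.pyGetD acc (-1) 0 then acc ++ [index] else acc) []
    -- pages[index]: index is always in range here, so the default is never used
    indices.map (fun index => PySem.List.pyGetD pages index 0)

-- ===== PORT B =====
def sample_pages_py_alt (pages : List Int) : List Int :=
  let n : Int := pages.length
  let sc : Int := PySem.Int.floordiv (n + 1) 2
  (pages.foldl
    (fun (st : List Int × Int) p =>
      ((if st.2 = 0 ∨ st.2 > n - sc then st.1 ++ [p] else st.1),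
        PySem.Int.mod (st.2 + sc) n))
    (([] : List Int), (0 : Int))).1

-- ===== PRECONDITION & SPEC =====
def Spec_sample_pages_py (pages : List Int) (out : List Int) : Prop := out = sample_pages_py_alt pages
instance (pages : List Int) (out : List Int) : Decidable (Spec_sample_pages_py pages out) := by unfold Spec_sample_pages_py; infer_instance

-- ===== CLAIM (what is proved, stated in full; the proofs are below) =====
def Claim_equal_sample_pages_py : Prop := ∀ (pages : List Int), Dom_sample_pages_py pages → Spec_sample_pages_py pages (sample_pages_py pages)

-- ===== LEMMAS AND PROOFS =====

-- the common closed form: the sampled pages, indexed i*n/m for i < m, with n = |pages| and m = ⌈n/2⌉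
def pvTarget (pages : List Int) : List Int :=
  (List.range ((pages.length + 1) / 2)).map
    (fun i => pages.getD (i * pages.length / ((pages.length + 1) / 2)) 0)

lemma pv_sc_cast (n : Nat) : PySem.Int.floordiv ((n : Int) + 1) 2 = (((n + 1) / 2 : Nat) : Int) := by
  rw [show ((n : Int) + 1) = (((n + 1 : Nat)) : Int) by push_cast; ring,
    show (2 : Int) = ((2 : Nat) : Int) by norm_num, PySem.Int.floordiv_natCast]

lemma pv_idx_cast (k n m : Nat) :
    PySem.Int.floordiv ((k : Int) * (n : Int)) (m : Int) = ((k * n / m : Nat) : Int) := by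
  rw [show ((k : Int) * (n : Int)) = (((k * n : Nat)) : Int) by push_cast; ring,
    PySem.Int.floordiv_natCast]

lemma pv_div_mono (n m j : Nat) (hm : 0 < m) (hnm : m ≤ n) : j * n / m < (j + 1) * n / m := by
  have h2 : j * n + m ≤ (j + 1) * n := by
    have h3 : (j + 1) * n = j * n + n := by ring
    omega
  calc j * n / m < j * n / m + 1 := Nat.lt_succ_self _
    _ = (j * n + m) / m := (Nat.add_div_right _ hm).symm
    _ ≤ ((j + 1) * n) / m := Nat.div_le_div_right h2

-- A's index loop: the clamp is a no-op and the dedup test always appends (indices strictly increase)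
lemma pv_fold_a (n m : Nat) (hm0 : 0 < m) (hmn : m ≤ n) (hn0 : 0 < n) :
    ∀ k, k ≤ m →
    (List.range k).foldl
      (fun (x : List Int) (y : Nat) =>
        if x = [] ∨ min ((n : Int) - 1) (PySem.Int.floordiv ((y : Int) * (n : Int)) (m : Int))
            ≠ PySem.List.pyGetD x (-1) 0 then
          x ++ [min ((n : Int) - 1) (PySem.Int.floordiv ((y : Int) * (n : Int)) (m : Int))]
        else x) []
    = (List.range k).map (fun i => ((i * n / m : Nat) : Int)) := by
  intro k hk
  induction k with
  | zero => simp
  | succ k ih =>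
    rw [List.range_succ, List.foldl_append, ih (by omega)]
    simp only [List.foldl_cons, List.foldl_nil, List.map_append, List.map_cons, List.map_nil]
    have hidx : min ((n : Int) - 1) (PySem.Int.floordiv ((k : Int) * (n : Int)) (m : Int))
        = ((k * n / m : Nat) : Int) := by
      rw [pv_idx_cast]
      have hlt : k * n / m < n := by
        rw [Nat.div_lt_iff_lt_mul hm0, mul_comm n m]
        exact Nat.mul_lt_mul_of_lt_of_le (by omega) (le_refl n) hn0
      rw [min_eq_right]; omega
    rw [hidx]
    rcases Nat.eq_zero_or_pos k with hk0 | hk1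
    · subst hk0; simp
    · have hlast : PySem.List.pyGetD ((List.range k).map (fun i => ((i * n / m : Nat) : Int))) (-1) 0
          = (((k - 1) * n / m : Nat) : Int) := by
        have hr : List.range k = List.range (k - 1) ++ [k - 1] := by
          rw [← List.range_succ]; congr 1; omega
        rw [hr, List.map_append, List.map_cons, List.map_nil,
          PySem.List.pyGetD_neg_one_append_singleton]
      have hne : ((k * n / m : Nat) : Int) ≠ (((k - 1) * n / m : Nat) : Int) := by
        have hmono := pv_div_mono n m (k - 1) hm0 hmn
        have hkk : k - 1 + 1 = k := by omega
        rw [hkk] at hmono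
        intro h; exact absurd (Int.ofNat_inj.mp h) (by omega)
      rw [if_pos (Or.inr (by rw [hlast]; exact hne))]

lemma a_eq_target (pages : List Int) : sample_pages_py pages = pvTarget pages := by
  by_cases h2 : 2 ≤ pages.length
  · simp only [sample_pages_py, pvTarget]
    rw [pv_sc_cast]
    set n := pages.length with hn
    have hm0 : 0 < (n + 1) / 2 := by omega
    have hmax : max 1 ((((n + 1) / 2 : Nat)) : Int) = (((n + 1) / 2 : Nat) : Int) := by
      rw [max_eq_right]; exact_mod_cast hm0
    rw [hmax]
    have hge : ¬ ((((n + 1) / 2 : Nat) : Int) ≥ (n : Int)) := by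
      have hlt : (n + 1) / 2 < n := by omega
      intro h; exact absurd (by exact_mod_cast h : n ≤ (n + 1) / 2) (by omega)
    rw [if_neg hge, PySem.List.pyRange_zero_natCast, List.foldl_map,
      pv_fold_a n ((n + 1) / 2) hm0 (by omega) (by omega) _ le_rfl, List.map_map]
    apply List.map_congr_left
    intro i _
    simp only [Function.comp_apply]
    rw [PySem.List.pyGetD_natCast]
  · rcases pages with _ | ⟨a, _ | ⟨b, t⟩⟩
    · rfl
    · simp [sample_pages_py, pvTarget, PySem.Int.floordiv]
    · simp at h2

-- ===== B-side proof: the filter pass selects exactly the indices i*n/m =====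

-- B's keep-test, as a predicate on the page position j
def pvPb (n m j : Nat) : Bool := decide (j * m % n = 0 ∨ n - m < j * m % n)

-- loop invariant: after j steps the remainder is (j*m) % n, and the kept pages
-- are those at the positions of [0..j) passing pvPb
lemma pv_fold_b (pages : List Int) (m : Nat) (hmn : m ≤ pages.length) :
    ∀ (k j : Nat) (acc : List Int), j + k = pages.length →
    ((pages.drop j).foldl
      (fun (st : List Int × Int) p =>
        ((if st.2 = 0 ∨ st.2 > (pages.length : Int) - (m : Int) then st.1 ++ [p] else st.1),
          PySem.Int.mod (st.2 + (m : Int)) (pages.length : Int)))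
      (acc, ((j * m % pages.length : Nat) : Int))).1
    = acc ++ ((List.range' j k).filter (pvPb pages.length m)).map (fun t => pages.getD t 0) := by
  intro k
  induction k with
  | zero =>
    intro j acc hj
    rw [List.drop_of_length_le (by omega)]
    simp
  | succ k ih =>
    intro j acc hj
    have hjlt : j < pages.length := by omega
    rw [List.drop_eq_getElem_cons hjlt, List.foldl_cons]
    have hrstep : PySem.Int.mod (((j * m % pages.length : Nat) : Int) + (m : Int)) (pages.length : Int)
        = (((j + 1) * m % pages.length : Nat) : Int) := by
      rw [show ((j * m % pages.length : Nat) : Int) + (m : Int)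
            = (((j * m % pages.length + m : Nat)) : Int) by push_cast; ring,
        PySem.Int.mod_natCast]
      congr 1
      rw [Nat.mod_add_mod]
      congr 1
      ring
    have hcond : (((j * m % pages.length : Nat) : Int) = 0 ∨
        ((j * m % pages.length : Nat) : Int) > (pages.length : Int) - (m : Int))
        ↔ (j * m % pages.length = 0 ∨ pages.length - m < j * m % pages.length) := by
      omega
    rw [List.range'_succ, List.filter_cons]
    by_cases hc : j * m % pages.length = 0 ∨ pages.length - m < j * m % pages.length
    · rw [if_pos (hcond.mpr hc), hrstep]
      have := ih (j + 1) (acc ++ [pages[j]]) (by omega)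
      rw [this]
      simp [pvPb, hc, List.getD, List.getElem?_eq_getElem hjlt]
    · rw [if_neg (fun h => hc (hcond.mp h)), hrstep]
      have := ih (j + 1) acc (by omega)
      rw [this]
      simp [pvPb, hc]

-- position j is kept by B iff it is one of A's sample indices i*n/m
lemma pv_mem (n m : Nat) (hm0 : 0 < m) (hmn : m ≤ n) (j : Nat) :
    (j < n ∧ (j * m % n = 0 ∨ n - m < j * m % n)) ↔ ∃ i, i < m ∧ i * n / m = j := by
  have hn0 : 0 < n := lt_of_lt_of_le hm0 hmn
  constructor
  · rintro ⟨hjn, hP⟩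
    have hqr : n * (j * m / n) + j * m % n = j * m := Nat.div_add_mod _ _
    have hrn : j * m % n < n := Nat.mod_lt _ hn0
    rcases hP with hr0 | hrbig
    · refine ⟨j * m / n, ?_, ?_⟩
      · -- n*q = j*m < n*m, so q < m
        have h1 : j * m ≤ (n - 1) * m := Nat.mul_le_mul_right m (by omega)
        have h2 : (n - 1) * m < n * m := Nat.mul_lt_mul_of_lt_of_le (by omega) le_rfl hm0
        have h3 : n * (j * m / n) < n * m := by omega
        exact Nat.lt_of_mul_lt_mul_left h3
      · -- j*m ≤ q*n < (j+1)*m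
        apply Nat.div_eq_of_lt_le
        · have e0 : (j * m / n) * n = n * (j * m / n) := by ring
          rw [e0]; omega
        · have e0 : (j * m / n) * n = n * (j * m / n) := by ring
          have e2 : (j + 1) * m = j * m + m := by ring
          rw [e0, e2]; omega
    · refine ⟨j * m / n + 1, ?_, ?_⟩
      · -- (q+1)*n < n*m, so q+1 < m
        have e1 : n * (j * m / n + 1) = n * (j * m / n) + n := by ring
        have h1 : j * m ≤ (n - 1) * m := Nat.mul_le_mul_right m (by omega)
        have h2 : (n - 1) * m + m = n * m := by
          have : (n - 1) * m + m = (n - 1 + 1) * m := by ring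
          rw [this]; congr 1; omega
        have h3 : n * (j * m / n + 1) < n * m := by omega
        exact Nat.lt_of_mul_lt_mul_left h3
      · apply Nat.div_eq_of_lt_le
        · have e1 : (j * m / n + 1) * n = n * (j * m / n) + n := by ring
          rw [e1]; omega
        · have e1 : (j * m / n + 1) * n = n * (j * m / n) + n := by ring
          have e2 : (j + 1) * m = j * m + m := by ring
          rw [e1, e2]; omega
  · rintro ⟨i, him, hij⟩
    have h1 : j * m ≤ i * n := by
      rw [← hij]; exact Nat.div_mul_le_self _ _
    have h2 : i * n < j * m + m := by
      rw [← hij]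
      calc i * n = m * (i * n / m) + i * n % m := (Nat.div_add_mod _ _).symm
        _ < m * (i * n / m) + m := Nat.add_lt_add_left (Nat.mod_lt _ hm0) _
        _ = (i * n / m) * m + m := by ring
    have hjn : j < n := by
      rw [← hij]
      apply Nat.div_lt_of_lt_mul
      have hlt : i * n < m * n := Nat.mul_lt_mul_of_lt_of_le him le_rfl hn0
      exact hlt
    refine ⟨hjn, ?_⟩
    by_contra hP
    push Not at hP
    obtain ⟨hr0, hrle⟩ := hP
    have hqr : n * (j * m / n) + j * m % n = j * m := Nat.div_add_mod _ _
    have hA : n * (j * m / n) < n * i := by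
      have : n * (j * m / n) < i * n := by omega
      rw [mul_comm i n] at this; exact this
    have hB : n * i < n * (j * m / n + 1) := by
      have e1 : n * (j * m / n + 1) = n * (j * m / n) + n := by ring
      have : i * n < n * (j * m / n) + n := by omega
      rw [mul_comm i n] at this; omega
    have hlt1 := Nat.lt_of_mul_lt_mul_left hA
    have hlt2 := Nat.lt_of_mul_lt_mul_left hB
    omega

-- the filtered positions, in order, are exactly A's index list
lemma pv_key (n m : Nat) (hm0 : 0 < m) (hmn : m ≤ n) :
    (List.range n).filter (pvPb n m) = (List.range m).map (fun i => i * n / m) := by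
  have hmono : StrictMono (fun i => i * n / m) :=
    strictMono_nat_of_lt_succ (fun i => pv_div_mono n m i hm0 hmn)
  have hs1 : ((List.range n).filter (pvPb n m)).Pairwise (· < ·) :=
    (List.pairwise_lt_range).filter _
  have hs2 : ((List.range m).map (fun i => i * n / m)).Pairwise (· < ·) :=
    List.pairwise_map.mpr ((List.pairwise_lt_range).imp (fun h => hmono h))
  have hperm : ((List.range n).filter (pvPb n m)).Perm
      ((List.range m).map (fun i => i * n / m)) := by
    rw [List.perm_ext_iff_of_nodup (hs1.imp (fun h => Nat.ne_of_lt h))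
      (hs2.imp (fun h => Nat.ne_of_lt h))]
    intro j
    simp only [List.mem_filter, List.mem_range, List.mem_map, pvPb, decide_eq_true_eq]
    rw [and_comm] at *
    constructor
    · rintro ⟨hP, hjn⟩
      obtain ⟨i, him, hij⟩ := (pv_mem n m hm0 hmn j).mp ⟨hjn, hP⟩
      exact ⟨i, him, hij⟩
    · rintro ⟨i, him, hij⟩
      obtain ⟨hjn, hP⟩ := (pv_mem n m hm0 hmn j).mpr ⟨i, him, hij⟩
      exact ⟨hP, hjn⟩
  exact hperm.eq_of_pairwise (fun _ _ _ _ h1 h2 => absurd h2 (lt_asymm h1)) hs1 hs2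

lemma alt_eq_target (pages : List Int) : sample_pages_py_alt pages = pvTarget pages := by
  rcases Nat.eq_zero_or_pos pages.length with h0 | hn0
  · rw [List.eq_nil_of_length_eq_zero h0]; rfl
  · simp only [sample_pages_py_alt, pvTarget]
    rw [pv_sc_cast]
    set n := pages.length with hn
    set m := (n + 1) / 2 with hm
    have hm0 : 0 < m := by omega
    have hmn : m ≤ n := by omega
    have h := pv_fold_b pages m (by omega) n 0 [] (by omega)
    rw [List.drop_zero] at h
    simp only [Nat.zero_mul, Nat.zero_mod, Nat.cast_zero] at h
    rw [h, List.nil_append,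
      show List.range' 0 n = List.range n from List.range_eq_range'.symm,
      pv_key n m hm0 hmn, List.map_map]
    simp [Function.comp]

-- ===== VERDICT (by name: the statement is the Claim_ definition above) =====
theorem sample_pages_py_spec : Claim_equal_sample_pages_py := by
  intro pages _
  unfold Spec_sample_pages_py
  rw [a_eq_target, alt_eq_target]
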